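-- pv_equiv track=rewrite | github.com/jeff87654/Lifting | run_sn_fresh.py | fpf_partitions
-- ===== SOURCE A (Python) =====
-- def fpf_partitions(n: int):
--     """All partitions of n with parts >= 2, descending order."""
--     if n < 2:
--         return []
--     out = []
--
--     def rec(rem, mx, cur):
--         if rem == 0:
--             out.append(tuple(cur))
--             return
--         for p in range(min(rem, mx), 1, -1):
--             cur.append(p)
--             rec(rem - p, p, cur)
--             cur.pop()
--
--     rec(n, n, [])
--     return out
-- ===== SOURCE B (Python) =====
-- def fpf_partitions(n: int):
--     """All partitions of n with parts >= 2, descending order."""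
--     if n < 2:
--         return []
--     out = []
--     # Iterative depth-first search with an explicit stack of (rem, mx, prefix)
--     # frames; pushing candidate parts in ascending order makes the LIFO pop
--     # visit them descending, giving the reverse-lexicographic output order.
--     stack = [(n, n, ())]
--     while stack:
--         rem, mx, cur = stack.pop()
--         if rem == 0:
--             out.append(cur)
--         else:
--             for p in range(2, min(rem, mx) + 1):
--                 stack.append((rem - p, p, cur + (p,)))
--     return out
-- ===== Notes on version B (the rewrite author's own statement) =====
-- stated objective: alternative
-- what changed: Replaced the nested recursive backtracking over a shared mutable cur/out with an iterative depth-first search driven by an explicit LIFO stack of (rem, mx, prefix) frames; children are pushed in ascending order so pops preserve the reverse-lexicographic output order.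
import Mathlib
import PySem

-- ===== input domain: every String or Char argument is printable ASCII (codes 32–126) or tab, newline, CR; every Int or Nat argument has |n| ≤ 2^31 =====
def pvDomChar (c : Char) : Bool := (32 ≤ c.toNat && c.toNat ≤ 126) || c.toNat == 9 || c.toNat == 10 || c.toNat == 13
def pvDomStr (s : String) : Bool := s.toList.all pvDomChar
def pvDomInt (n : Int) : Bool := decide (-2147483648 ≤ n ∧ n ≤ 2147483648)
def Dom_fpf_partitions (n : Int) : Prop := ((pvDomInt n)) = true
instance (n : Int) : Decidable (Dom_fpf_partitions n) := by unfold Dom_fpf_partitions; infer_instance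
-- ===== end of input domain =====

-- B replaces A's mutating recursion by an iterative depth-first search over an
-- explicit stack of (rem, mx, prefix) frames (objective: alternative decomposition).
-- Return-value equivalence is proved for all n.

-- ===== PORT A =====
-- A's inner 'rec(rem, mx, cur)' appending tuples to the shared 'out' list:
-- cur/out are threaded as explicit parameters; cur.append/pop become 'cur ++ [p]'
-- passed down, out.append(tuple(cur)) becomes 'out ++ [cur]'.
def fpf_partitions_recA (rem mx : Int) (cur : List Int) (out : List (List Int)) :
    List (List Int) :=
  if rem = 0 then out ++ [cur]
  else
    (PySem.List.pyRange (min rem mx) 1 (-1)).attach.foldl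
      (fun acc x => fpf_partitions_recA (rem - x.1) x.1 (cur ++ [x.1]) acc) out
termination_by rem.toNat
decreasing_by
  have h := (PySem.List.mem_pyRange_neg_one).1 x.2
  omega

def fpf_partitions (n : Int) : List (List Int) :=
  if n < 2 then [] else fpf_partitions_recA n n [] []

-- ===== PORT B =====
-- Termination measure for the while loop: each pending frame (rem, mx, cur)
-- weighs 2^rem; popping a frame and pushing its children strictly decreases it.
def fpf_stackMeasure (stack : List (Int × Int × List Int)) : Nat :=
  (stack.map (fun f => 2 ^ f.1.toNat)).sum

-- Geometric bound used by the measure: the pushed children of a frame of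
-- weight 2^rem weigh strictly less than 2^rem in total.
theorem fpf_sum_pow_aux (rem : Int) :
    ∀ (K : Nat), (K : Int) ≤ rem - 1 →
      ((List.range K).map (fun (k : Nat) => 2 ^ (rem - 2 - (k : Int)).toNat)).sum
        + 2 ^ (rem - 1 - (K : Int)).toNat ≤ 2 ^ (rem - 1).toNat := by
  intro K
  induction K with
  | zero => intro _; simp
  | succ K ih =>
      intro hK
      have hK' : (K : Int) ≤ rem - 1 := by push_cast at hK ⊢; omega
      have h1 : (rem - 1 - ((K : Int) + 1)).toNat = (rem - 2 - (K : Int)).toNat := by omega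
      have h2 : (rem - 1 - (K : Int)).toNat = (rem - 2 - (K : Int)).toNat + 1 := by
        push_cast at hK; omega
      have := ih hK'
      rw [List.range_succ, List.map_append, List.sum_append]
      simp only [List.map_cons, List.map_nil, List.sum_cons, List.sum_nil]
      push_cast
      rw [h1]
      rw [h2] at this
      omega

theorem fpf_stackMeasure_push (rem mx : Int) (cur : List Int)
    (rest : List (Int × Int × List Int)) :
    fpf_stackMeasure
      ((PySem.List.pyRange 2 (min rem mx + 1) 1).foldl
        (fun st p => (rem - p, p, cur ++ [p]) :: st) rest)
      < 2 ^ rem.toNat + fpf_stackMeasure rest := by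
  rw [List.foldl_flip_cons_eq_append]
  unfold fpf_stackMeasure
  rw [List.map_append, List.sum_append, List.map_reverse, List.sum_reverse, List.map_map]
  by_cases hm : min rem mx + 1 ≤ 2
  · rw [PySem.List.pyRange_one_eq_nil hm]
    simp
  · have hm2 : 2 ≤ min rem mx := by omega
    have hrem : 2 ≤ rem := le_trans hm2 (min_le_left _ _)
    rw [PySem.List.pyRange_one, List.map_map]
    have haux := fpf_sum_pow_aux rem (min rem mx + 1 - 2).toNat (by omega)
    have hfun : (((fun (f : Int × Int × List Int) => 2 ^ f.1.toNat) ∘ fun p => ((rem - p, p, cur ++ [p]) : Int × Int × List Int)) ∘ fun (k : Nat) => 2 + (k : Int))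
        = fun (k : Nat) => 2 ^ (rem - 2 - (k : Int)).toNat := by
      funext k
      simp only [Function.comp_apply]
      congr 2
      ring
    rw [hfun]
    have hpos : 1 ≤ 2 ^ (rem - 1 - ((min rem mx + 1 - 2).toNat : Int)).toNat := Nat.one_le_two_pow
    have hstep : 2 ^ (rem - 1).toNat < 2 ^ rem.toNat := by
      apply Nat.pow_lt_pow_right (by omega)
      omega
    omega

-- B's while loop: 'stack' is kept top-first (Lean cons = Python append at the
-- end), so the ascending for-loop pushes become a left fold that conses; a pop
-- is the head.  'while stack:' is this structural recursion on the stack.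
def fpf_partitions_altLoop (stack : List (Int × Int × List Int))
    (out : List (List Int)) : List (List Int) :=
  match stack with
  | [] => out
  | (rem, mx, cur) :: rest =>
      if rem = 0 then fpf_partitions_altLoop rest (out ++ [cur])
      else
        fpf_partitions_altLoop
          ((PySem.List.pyRange 2 (min rem mx + 1) 1).foldl
            (fun st p => (rem - p, p, cur ++ [p]) :: st) rest) out
termination_by fpf_stackMeasure stack
decreasing_by
  · unfold fpf_stackMeasure; simp
  · exact fpf_stackMeasure_push rem mx cur rest

def fpf_partitions_alt (n : Int) : List (List Int) :=
  if n < 2 then [] else fpf_partitions_altLoop [(n, n, [])] []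

-- ===== PRECONDITION & SPEC =====
def Spec_fpf_partitions (n : Int) (out : List (List Int)) : Prop := out = fpf_partitions_alt n
instance (n : Int) (out : List (List Int)) : Decidable (Spec_fpf_partitions n out) := by unfold Spec_fpf_partitions; infer_instance

-- ===== CLAIM (what is proved, stated in full; the proofs are below) =====
def Claim_equal_fpf_partitions : Prop := ∀ (n : Int), Dom_fpf_partitions n → Spec_fpf_partitions n (fpf_partitions n)

-- ===== LEMMAS AND PROOFS =====

-- Ghost specification (proof-only): the pure list of partitions of rem with
-- parts in [2, mx], largest part first, parts tried in descending order.
def fpf_pureP (rem mx : Int) : List (List Int) :=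
  if rem = 0 then [[]]
  else
    (PySem.List.pyRange (min rem mx) 1 (-1)).attach.foldl
      (fun res x => res ++ (fpf_pureP (rem - x.1) x.1).map (fun t => x.1 :: t)) []
termination_by rem.toNat
decreasing_by
  have h := (PySem.List.mem_pyRange_neg_one).1 x.2
  omega

-- A's accumulator recursion equals 'out' followed by the pure results prefixed by 'cur'.
theorem fpf_recA_eq_pureP (rem mx : Int) (cur : List Int) (out : List (List Int)) :
    fpf_partitions_recA rem mx cur out
      = out ++ (fpf_pureP rem mx).map (fun t => cur ++ t) := by
  rw [fpf_partitions_recA, fpf_pureP]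
  split
  · simp
  · have h1 : ∀ (acc : List (List Int)) (x : {p // p ∈ PySem.List.pyRange (min rem mx) 1 (-1)}),
      x ∈ (PySem.List.pyRange (min rem mx) 1 (-1)).attach →
      fpf_partitions_recA (rem - x.1) x.1 (cur ++ [x.1]) acc
        = acc ++ (fpf_pureP (rem - x.1) x.1).map (fun t => (cur ++ [x.1]) ++ t) := by
      intro acc x _
      exact fpf_recA_eq_pureP (rem - x.1) x.1 (cur ++ [x.1]) acc
    rw [PySem.List.foldl_congr_mem _ _ _ _ h1,
      PySem.List.foldl_append_eq_flatMap, PySem.List.foldl_append_eq_flatMap]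
    simp [List.map_flatMap, List.map_map, Function.comp_def]
termination_by rem.toNat
decreasing_by
  have h := (PySem.List.mem_pyRange_neg_one).1 x.2
  omega

-- B's stack loop equals 'out' followed by the pure results of each pending frame.
theorem fpf_altLoop_eq (stack : List (Int × Int × List Int)) (out : List (List Int)) :
    fpf_partitions_altLoop stack out
      = out ++ stack.flatMap (fun f => (fpf_pureP f.1 f.2.1).map (fun t => f.2.2 ++ t)) := by
  fun_induction fpf_partitions_altLoop stack out with
  | case1 out => simp
  | case2 out mx cur rest ih =>
      rw [ih]
      have h0 : fpf_pureP 0 mx = [[]] := by rw [fpf_pureP]; simp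
      simp [h0]
  | case3 out rem mx cur rest h ih =>
      rw [ih]
      have hpure : fpf_pureP rem mx
          = (PySem.List.pyRange (min rem mx) 1 (-1)).flatMap
              (fun p => (fpf_pureP (rem - p) p).map (fun t => p :: t)) := by
        rw [fpf_pureP, if_neg h,
          List.foldl_attach (l := PySem.List.pyRange (min rem mx) 1 (-1))
            (f := fun res p => res ++ (fpf_pureP (rem - p) p).map (fun t => p :: t)),
          PySem.List.foldl_append_eq_flatMap]
        simp
      have hrev : (PySem.List.pyRange 2 (min rem mx + 1) 1).reverse
          = PySem.List.pyRange (min rem mx) 1 (-1) := by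
        have hr := PySem.List.pyRange_neg_one_eq_reverse (min rem mx) 1
        norm_num at hr
        exact hr.symm
      rw [List.foldl_flip_cons_eq_append, List.flatMap_append, ← List.map_reverse, hrev]
      simp only [List.flatMap_cons, hpure, List.flatMap_map, List.map_flatMap, List.map_map]
      simp [Function.comp_def, List.append_assoc]

-- ===== VERDICT (by name: the statement is the Claim_ definition above) =====
theorem fpf_partitions_spec : Claim_equal_fpf_partitions := by
  intro n _
  unfold Spec_fpf_partitions fpf_partitions fpf_partitions_alt
  split
  · rfl
  · rw [fpf_recA_eq_pureP, fpf_altLoop_eq]; simp
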